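-- pv_equiv track=rewrite | github.com/sparrowwallet/UltrafastSecp256k1 | scripts/release_diff.py | categorize_changes
-- ===== SOURCE A (Python) =====
-- def categorize_changes(changed_files):
--     """Categorize changed files by area."""
--     categories = {
--         'abi': [], 'ct_layer': [], 'protocol': [], 'gpu': [],
--         'tests': [], 'docs': [], 'ci': [], 'build': [], 'other': [],
--     }
--     for status, files in changed_files.items():
--         for f in files:
--             entry = f"{status}\t{f}"
--             if 'include/ufsecp/' in f:
--                 categories['abi'].append(entry)
--             elif 'ct_' in f or '/ct/' in f:
--                 categories['ct_layer'].append(entry)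
--             elif any(p in f for p in ['musig', 'frost', 'adaptor', 'silent_pay', 'ecies', 'dleq']):
--                 categories['protocol'].append(entry)
--             elif any(p in f for p in ['cuda/', 'opencl/', 'metal/']):
--                 categories['gpu'].append(entry)
--             elif any(p in f for p in ['test', 'audit/', 'fuzz']):
--                 categories['tests'].append(entry)
--             elif f.startswith('docs/') or f.endswith('.md'):
--                 categories['docs'].append(entry)
--             elif '.github/' in f:
--                 categories['ci'].append(entry)
--             elif 'CMakeLists' in f or f.endswith('.cmake'):
--                 categories['build'].append(entry)
--             else:
--                 categories['other'].append(entry)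
--     return categories
-- ===== SOURCE B (Python) =====
-- RULES = [
--     ('abi',      lambda f: 'include/ufsecp/' in f),
--     ('ct_layer', lambda f: 'ct_' in f or '/ct/' in f),
--     ('protocol', lambda f: any(p in f for p in ('musig', 'frost', 'adaptor', 'silent_pay', 'ecies', 'dleq'))),
--     ('gpu',      lambda f: any(p in f for p in ('cuda/', 'opencl/', 'metal/'))),
--     ('tests',    lambda f: any(p in f for p in ('test', 'audit/', 'fuzz'))),
--     ('docs',     lambda f: f.startswith('docs/') or f.endswith('.md')),
--     ('ci',       lambda f: '.github/' in f),
--     ('build',    lambda f: 'CMakeLists' in f or f.endswith('.cmake')),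
-- ]
--
--
-- def categorize_changes(changed_files):
--     """Categorize changed files by area (category-major sieve).
--
--     Instead of deciding a category per file, make one pass per category:
--     each rule takes the files it matches out of the remaining pool, the
--     leftovers become 'other'.  First-match priority is preserved because
--     matched files leave the pool before later rules see them.
--     """
--     remaining = [(s, f) for s, files in changed_files.items() for f in files]
--     categories = {}
--     for name, pred in RULES:
--         categories[name] = [f"{s}\t{f}" for s, f in remaining if pred(f)]
--         remaining = [p for p in remaining if not pred(p[1])]
--     categories['other'] = [f"{s}\t{f}" for s, f in remaining]
--     return categories
-- ===== Notes on version B (the rewrite author's own statement) =====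
-- stated objective: alternative
-- what changed: Replaces A's file-major if/elif cascade (one dict-append per file) with a category-major sieve: one pass per rule that extracts all matching files from a shrinking remaining pool and builds each category list wholesale, leftovers becoming 'other'.
import Mathlib
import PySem

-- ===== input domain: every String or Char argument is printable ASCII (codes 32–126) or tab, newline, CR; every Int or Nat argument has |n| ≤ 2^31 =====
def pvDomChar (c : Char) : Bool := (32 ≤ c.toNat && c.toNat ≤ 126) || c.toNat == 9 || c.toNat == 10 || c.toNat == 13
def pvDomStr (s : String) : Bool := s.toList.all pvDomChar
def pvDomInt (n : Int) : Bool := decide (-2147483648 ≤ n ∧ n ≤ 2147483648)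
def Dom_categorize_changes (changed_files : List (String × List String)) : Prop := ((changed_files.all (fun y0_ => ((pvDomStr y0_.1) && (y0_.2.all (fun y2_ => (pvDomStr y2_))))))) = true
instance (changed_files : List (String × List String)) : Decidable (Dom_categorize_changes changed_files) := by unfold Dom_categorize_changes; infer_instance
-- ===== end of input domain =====

-- B replaces A's file-major if/elif cascade by a category-major sieve (one filtering
-- pass per rule over a shrinking pool, leftovers -> 'other'); return value only.

-- ===== PORT A =====
-- the literal initial dict of A
def pvCatInit : PySem.Dict String (List String) :=
  PySem.Dict.ofList [("abi", []), ("ct_layer", []), ("protocol", []), ("gpu", []),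
    ("tests", []), ("docs", []), ("ci", []), ("build", []), ("other", [])]

-- the body of A's inner loop (the if/elif cascade), one step per file
def pvStepA (status : String) (cats : PySem.Dict String (List String)) (f : String) :
    PySem.Dict String (List String) :=
  let entry := status ++ "\t" ++ f
  if PySem.Str.isIn "include/ufsecp/" f then cats.modify "abi" [] (· ++ [entry])
  else if PySem.Str.isIn "ct_" f || PySem.Str.isIn "/ct/" f then cats.modify "ct_layer" [] (· ++ [entry])
  else if ["musig", "frost", "adaptor", "silent_pay", "ecies", "dleq"].any (fun p => PySem.Str.isIn p f) then
    cats.modify "protocol" [] (· ++ [entry])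
  else if ["cuda/", "opencl/", "metal/"].any (fun p => PySem.Str.isIn p f) then
    cats.modify "gpu" [] (· ++ [entry])
  else if ["test", "audit/", "fuzz"].any (fun p => PySem.Str.isIn p f) then
    cats.modify "tests" [] (· ++ [entry])
  else if PySem.Str.startswith f "docs/" || PySem.Str.endswith f ".md" then
    cats.modify "docs" [] (· ++ [entry])
  else if PySem.Str.isIn ".github/" f then cats.modify "ci" [] (· ++ [entry])
  else if PySem.Str.isIn "CMakeLists" f || PySem.Str.endswith f ".cmake" then
    cats.modify "build" [] (· ++ [entry])
  else cats.modify "other" [] (· ++ [entry])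

def categorize_changes (changed_files : List (String × List String)) : List (String × List String) :=
  (changed_files.foldl
    (fun cats sf => sf.2.foldl (pvStepA sf.1) cats) pvCatInit).items

-- ===== PORT B =====
-- the ordered rule table RULES of Source B
def pvRules : List (String × (String → Bool)) :=
  [("abi",      fun f => PySem.Str.isIn "include/ufsecp/" f),
   ("ct_layer", fun f => PySem.Str.isIn "ct_" f || PySem.Str.isIn "/ct/" f),
   ("protocol", fun f => ["musig", "frost", "adaptor", "silent_pay", "ecies", "dleq"].any (fun p => PySem.Str.isIn p f)),
   ("gpu",      fun f => ["cuda/", "opencl/", "metal/"].any (fun p => PySem.Str.isIn p f)),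
   ("tests",    fun f => ["test", "audit/", "fuzz"].any (fun p => PySem.Str.isIn p f)),
   ("docs",     fun f => PySem.Str.startswith f "docs/" || PySem.Str.endswith f ".md"),
   ("ci",       fun f => PySem.Str.isIn ".github/" f),
   ("build",    fun f => PySem.Str.isIn "CMakeLists" f || PySem.Str.endswith f ".cmake")]

-- the category-major sieve of Source B: per rule, extract the matches, shrink the pool
def categorize_changes_alt (changed_files : List (String × List String)) : List (String × List String) :=
  let remaining0 := changed_files.flatMap (fun sf => sf.2.map (fun f => (sf.1, f)))
  let st := pvRules.foldl
    (fun (acc : PySem.Dict String (List String) × List (String × String)) r =>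
      (acc.1.insert r.1 ((acc.2.filter (fun p => r.2 p.2)).map (fun p => p.1 ++ "\t" ++ p.2)),
       acc.2.filter (fun p => !(r.2 p.2))))
    (PySem.Dict.empty, remaining0)
  (st.1.insert "other" (st.2.map (fun p => p.1 ++ "\t" ++ p.2))).items

-- ===== PRECONDITION & SPEC =====
def Spec_categorize_changes (changed_files : List (String × List String)) (out : List (String × List String)) : Prop := out = categorize_changes_alt changed_files
instance (changed_files : List (String × List String)) (out : List (String × List String)) : Decidable (Spec_categorize_changes changed_files out) := by unfold Spec_categorize_changes; infer_instance

-- ===== CLAIM (what is proved, stated in full; the proofs are below) =====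
def Claim_equal_categorize_changes : Prop := ∀ (changed_files : List (String × List String)), Dom_categorize_changes changed_files → Spec_categorize_changes changed_files (categorize_changes changed_files)

-- ===== LEMMAS AND PROOFS =====

-- the category A's cascade assigns to a file name
def pvCatOf (f : String) : String :=
  if PySem.Str.isIn "include/ufsecp/" f then "abi"
  else if PySem.Str.isIn "ct_" f || PySem.Str.isIn "/ct/" f then "ct_layer"
  else if ["musig", "frost", "adaptor", "silent_pay", "ecies", "dleq"].any (fun p => PySem.Str.isIn p f) then "protocol"
  else if ["cuda/", "opencl/", "metal/"].any (fun p => PySem.Str.isIn p f) then "gpu"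
  else if ["test", "audit/", "fuzz"].any (fun p => PySem.Str.isIn p f) then "tests"
  else if PySem.Str.startswith f "docs/" || PySem.Str.endswith f ".md" then "docs"
  else if PySem.Str.isIn ".github/" f then "ci"
  else if PySem.Str.isIn "CMakeLists" f || PySem.Str.endswith f ".cmake" then "build"
  else "other"

def pvNames : List String :=
  ["abi", "ct_layer", "protocol", "gpu", "tests", "docs", "ci", "build", "other"]

def pvEnt (p : String × String) : String := p.1 ++ "\t" ++ p.2

-- the common normal form both ports are reduced to
def pvSpecList (l : List (String × String)) : List (String × List String) :=
  pvNames.map (fun n => (n, (l.filter (fun p => pvCatOf p.2 == n)).map pvEnt))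

lemma pvStepA_eq (s : String) (c : PySem.Dict String (List String)) (f : String) :
    pvStepA s c f = c.modify (pvCatOf f) [] (· ++ [s ++ "\t" ++ f]) := by
  unfold pvStepA pvCatOf
  split_ifs <;> rfl

lemma foldl_flat (cf : List (String × List String)) (d : PySem.Dict String (List String)) :
    cf.foldl (fun c sf => sf.2.foldl (pvStepA sf.1) c) d
      = (cf.flatMap (fun sf => sf.2.map (fun f => (sf.1, f)))).foldl
          (fun c p => pvStepA p.1 c p.2) d := by
  induction cf generalizing d with
  | nil => rfl
  | cons a l ih => simp [List.foldl_append, List.foldl_map, ih]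

lemma set_update_of_forall_mem {l s : List String} (h : ∀ x ∈ l, x ∈ s) :
    PySem.Set.update s l = s := by
  induction l generalizing s with
  | nil => exact PySem.Set.update_nil s
  | cons a t ih =>
    rw [PySem.Set.update_cons, PySem.Set.add_of_mem (h a (by simp))]
    exact ih (fun x hx => h x (by simp [hx]))

lemma pvCatOf_mem (f : String) : pvCatOf f ∈ pvNames := by
  unfold pvCatOf pvNames
  split_ifs <;> simp

lemma A_normal (cf : List (String × List String)) :
    categorize_changes cf
      = pvSpecList (cf.flatMap (fun sf => sf.2.map (fun f => (sf.1, f)))) := by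
  unfold categorize_changes
  rw [foldl_flat]
  set l := cf.flatMap (fun sf => sf.2.map (fun f => (sf.1, f))) with hl
  have hbody : (fun (c : PySem.Dict String (List String)) (p : String × String) =>
      pvStepA p.1 c p.2)
      = fun c p => c.modify (pvCatOf p.2) [] (· ++ [pvEnt p]) := by
    funext c p; rw [pvStepA_eq]; rfl
  rw [hbody]
  have hmap : l.foldl (fun c p => c.modify (pvCatOf p.2) [] (· ++ [pvEnt p])) pvCatInit
      = (l.map (fun p => (pvCatOf p.2, pvEnt p))).foldl
          (fun c q => c.modify q.1 [] (· ++ [q.2])) pvCatInit := by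
    rw [List.foldl_map]
  rw [hmap]
  set l' := l.map (fun p => (pvCatOf p.2, pvEnt p)) with hl'
  have hkeys : (l'.foldl (fun c q => c.modify q.1 [] (· ++ [q.2])) pvCatInit).keys = pvNames := by
    have := PySem.Dict.keys_foldl_modify_key l' Prod.fst ([] : List String)
      (fun _ q v => v ++ [q.2]) pvCatInit
    simp only at this
    rw [this]
    have hk : pvCatInit.keys = pvNames := by decide
    rw [hk]
    apply set_update_of_forall_mem
    intro x hx
    simp only [hl', List.map_map, List.mem_map, Function.comp] at hx
    obtain ⟨p, _, hp⟩ := hx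
    rw [← hp]
    exact pvCatOf_mem p.2
  have hnodup : (l'.foldl (fun c q => c.modify q.1 [] (· ++ [q.2])) pvCatInit).keys.Nodup := by
    rw [hkeys]; decide
  rw [PySem.Dict.items_eq_map_keys _ hnodup ([] : List String), hkeys]
  unfold pvSpecList
  apply List.map_congr_left
  intro n hn
  have hg := PySem.Dict.getD_foldl_modify_append l' pvCatInit n
  refine Prod.ext rfl ?_
  simp only
  rw [hg]
  have hinit : pvCatInit.getD n [] = [] := by
    fin_cases hn <;> decide
  rw [hinit, List.nil_append, hl', List.filter_map, List.map_map]
  rfl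

-- A's cascade category agrees pointwise with the sieve membership conditions
set_option maxHeartbeats 2000000 in
lemma B_normal (cf : List (String × List String)) :
    categorize_changes_alt cf
      = pvSpecList (cf.flatMap (fun sf => sf.2.map (fun f => (sf.1, f)))) := by
  unfold categorize_changes_alt
  set l := cf.flatMap (fun sf => sf.2.map (fun f => (sf.1, f))) with hl
  simp only [pvRules, List.foldl_cons, List.foldl_nil]
  simp only [PySem.Dict.items_insert, PySem.Dict.contains_insert, PySem.Dict.contains_empty,
    String.reduceBEq, Bool.or_self, Bool.false_eq_true, reduceIte]
  have hemp : (PySem.Dict.empty : PySem.Dict String (List String)).items = [] := rfl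
  simp only [hemp, List.nil_append, List.cons_append]
  unfold pvSpecList pvNames
  simp only [List.map_cons, List.map_nil, List.filter_filter]
  refine List.ext_getElem (by simp) ?_
  intro i hi hi'
  simp only [List.length_cons, List.length_nil] at hi
  interval_cases i <;>
    · simp only [List.getElem_cons_zero, List.getElem_cons_succ]
      refine Prod.ext rfl ?_
      simp only
      congr 1
      apply List.filter_congr
      intro p _
      unfold pvCatOf
      generalize PySem.Str.isIn "include/ufsecp/" p.2 = b0
      generalize (PySem.Str.isIn "ct_" p.2 || PySem.Str.isIn "/ct/" p.2) = b1
      generalize (["musig", "frost", "adaptor", "silent_pay", "ecies", "dleq"].any fun q => PySem.Str.isIn q p.2) = b2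
      generalize (["cuda/", "opencl/", "metal/"].any fun q => PySem.Str.isIn q p.2) = b3
      generalize (["test", "audit/", "fuzz"].any fun q => PySem.Str.isIn q p.2) = b4
      generalize (PySem.Str.startswith p.2 "docs/" || PySem.Str.endswith p.2 ".md") = b5
      generalize PySem.Str.isIn ".github/" p.2 = b6
      generalize (PySem.Str.isIn "CMakeLists" p.2 || PySem.Str.endswith p.2 ".cmake") = b7
      cases b0 <;> cases b1 <;> cases b2 <;> cases b3 <;> cases b4 <;> cases b5 <;> cases b6 <;> cases b7 <;> rfl

-- ===== VERDICT (by name: the statement is the Claim_ definition above) =====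
theorem categorize_changes_spec : Claim_equal_categorize_changes := by
  intro cf _
  show categorize_changes cf = categorize_changes_alt cf
  rw [A_normal, B_normal]
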